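-- pv_equiv track=rewrite | github.com/danieltebbutt/Portfolio | source/price.py | lastDates
-- ===== SOURCE A (Python) =====
-- def lastDates(prices, tickerList):
--     toReturn = {}
--     foundAlready = []
--     for price in reversed(sorted(prices.keys())):
--         if not price[0] in foundAlready:
--             foundAlready.append(price[0])
--             toReturn[price[0]] = price[1]
--     return toReturn
-- ===== SOURCE B (Python) =====
-- def lastDates(prices, tickerList):
--     latest = {}
--     for ticker, date in prices.keys():
--         if ticker not in latest or date > latest[ticker]:
--             latest[ticker] = date
--     return dict(sorted(latest.items(), reverse=True))
-- ===== Notes on version B (the rewrite author's own statement) =====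
-- stated objective: faster
-- what changed: A sorts all n (ticker, date) keys descending and keeps the first unseen ticker using a growing foundAlready membership list (an O(n*m) scan on top of the sort); B makes one unsorted pass keeping the latest date per ticker in a dict and only sorts the m per-ticker results descending at the end.
import Mathlib
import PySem

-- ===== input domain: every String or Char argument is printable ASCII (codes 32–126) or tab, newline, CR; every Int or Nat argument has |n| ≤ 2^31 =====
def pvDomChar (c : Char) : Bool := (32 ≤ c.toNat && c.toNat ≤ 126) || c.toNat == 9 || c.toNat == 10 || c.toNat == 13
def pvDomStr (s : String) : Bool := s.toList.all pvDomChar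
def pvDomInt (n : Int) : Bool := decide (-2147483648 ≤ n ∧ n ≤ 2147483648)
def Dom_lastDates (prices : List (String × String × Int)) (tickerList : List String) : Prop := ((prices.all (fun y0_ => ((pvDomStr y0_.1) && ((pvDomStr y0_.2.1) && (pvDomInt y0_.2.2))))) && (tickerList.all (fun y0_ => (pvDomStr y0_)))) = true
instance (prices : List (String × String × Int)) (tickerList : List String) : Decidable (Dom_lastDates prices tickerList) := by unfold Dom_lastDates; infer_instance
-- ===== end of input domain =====

-- B replaces A's "sort all n keys descending, keep first-unseen ticker via a growing
-- membership list" with a single pass keeping the maximum (latest) date per ticker,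
-- followed by a descending sort of the per-ticker results only; objective: faster.

-- ===== PORT A =====
-- prices is a Python dict keyed by (ticker, date) pairs; A only reads prices.keys(),
-- which is the ordered set of distinct (ticker, date) keys: PySem.Set.ofList.
def lastDates (prices : List (String × String × Int)) (tickerList : List String) : List (String × String) :=
  let keys : List (String × String) := PySem.Set.ofList (prices.map (fun p => (p.1, p.2.1)))
  (((PySem.List.sorted2 keys Prod.fst Prod.snd).reverse).foldl
    (fun (st : PySem.Dict String String × List String) price =>
      if price.1 ∈ st.2 then st
      else (st.1.insert price.1 price.2, st.2 ++ [price.1]))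
    (PySem.Dict.empty, [])).1.items

-- ===== PORT B =====
-- the loop body of B: `if ticker not in latest or date > latest[ticker]: latest[ticker] = date`
-- (the short-circuit `or` becomes two nested ifs; `latest[ticker]` is only read in the
-- contains-branch, where it exists, so the total getD with dummy default "" is exact)
def bStep (latest : PySem.Dict String String) (k : String × String) : PySem.Dict String String :=
  if latest.contains k.1 = false then latest.insert k.1 k.2
  else if latest.getD k.1 "" < k.2 then latest.insert k.1 k.2
  else latest

-- `dict(sorted(latest.items(), reverse=True))`: the sorted pair list has distinct keys,
-- so rebuilding a dict from it is that very association list.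
def lastDates_alt (prices : List (String × String × Int)) (tickerList : List String) : List (String × String) :=
  let keys : List (String × String) := PySem.Set.ofList (prices.map (fun p => (p.1, p.2.1)))
  let latest := keys.foldl bStep PySem.Dict.empty
  PySem.List.sorted2 latest.items Prod.fst Prod.snd true

-- ===== PRECONDITION & SPEC =====
def Spec_lastDates (prices : List (String × String × Int)) (tickerList : List String) (out : List (String × String)) : Prop := out = lastDates_alt prices tickerList
instance (prices : List (String × String × Int)) (tickerList : List String) (out : List (String × String)) : Decidable (Spec_lastDates prices tickerList out) := by unfold Spec_lastDates; infer_instance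

-- ===== CLAIM (what is proved, stated in full; the proofs are below) =====
def Claim_equal_lastDates : Prop := ∀ (prices : List (String × String × Int)) (tickerList : List String), Dom_lastDates prices tickerList → Spec_lastDates prices tickerList (lastDates prices tickerList)

-- ===== LEMMAS AND PROOFS =====

-- Python's lexicographic tuple comparison (as in PySem's two-key primitives) is the
-- strict order of the lexicographic product Lex (String × String)
theorem pyTupleLt_eq_lex (m x : String × String) :
    ((decide (m.1 < x.1) || (!decide (x.1 < m.1) && decide (m.2 < x.2))) = true)
      ↔ toLex m < toLex x := by
  rw [Prod.Lex.toLex_lt_toLex]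
  simp only [Bool.or_eq_true, Bool.and_eq_true, decide_eq_true_eq, Bool.not_eq_true',
    decide_eq_false_iff_not]
  constructor
  · rintro (h | ⟨h1, h2⟩)
    · exact Or.inl h
    · by_cases hlt : m.1 < x.1
      · exact Or.inl hlt
      · exact Or.inr ⟨le_antisymm (not_lt.mp h1) (not_lt.mp hlt), h2⟩
  · rintro (h | ⟨h1, h2⟩)
    · exact Or.inl h
    · exact Or.inr ⟨not_lt.mpr (le_of_eq h1), h2⟩

theorem max2?_eq_max?_lex (xs : List (String × String)) :
    PySem.List.max2? xs Prod.fst Prod.snd = PySem.List.max? xs (fun p => toLex p) := by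
  unfold PySem.List.max2? PySem.List.max?
  congr 1
  funext acc x
  cases acc with
  | none => rfl
  | some m => exact if_congr (pyTupleLt_eq_lex m x) rfl rfl

theorem filter_length_lt {α : Type} (p : α → Bool) (l : List α) (x : α)
    (hx : x ∈ l) (hpx : p x = false) : (l.filter p).length < l.length := by
  induction l with
  | nil => cases hx
  | cons a l ih =>
    rcases List.mem_cons.mp hx with rfl | hx
    · simp only [List.filter_cons, hpx]
      exact Nat.lt_succ_of_le (List.length_filter_le _ _)
    · cases hp : p a <;> simp only [List.filter_cons, hp] <;> simp only [List.length_cons]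
      · exact Nat.lt_succ_of_lt (ih hx)
      · exact Nat.succ_lt_succ (ih hx)

-- proof-only model of the common result: repeatedly select the maximum remaining
-- (ticker, date) key and drop that ticker
def bGo (keys : List (String × String)) : List (String × String) :=
  match h : PySem.List.max2? keys Prod.fst Prod.snd with
  | none => []
  | some m => (m.1, m.2) :: bGo (keys.filter (fun k => decide (k.1 ≠ m.1)))
termination_by keys.length
decreasing_by
  have hm : m ∈ keys := PySem.List.max?_mem (max2?_eq_max?_lex keys ▸ h)
  simp only [List.length_unattach]
  have h1 := filter_length_lt (fun x : {x // x ∈ keys} => decide ((↑x : String × String).1 ≠ m.1))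
    keys.attach ⟨m, hm⟩ (List.mem_attach _ _) (by simp)
  simpa using h1

-- A's loop, with the dict stripped away: first hit per ticker, in scan order
def aGo : List (String × String) → List String → List (String × String)
  | [], _ => []
  | p :: M, f => if p.1 ∈ f then aGo M f else p :: aGo M (f ++ [p.1])

theorem scan_items (M : List (String × String)) (d : PySem.Dict String String) (f : List String)
    (hinv : ∀ t, d.contains t = true → t ∈ f) :
    (M.foldl (fun (st : PySem.Dict String String × List String) price =>
        if price.1 ∈ st.2 then st
        else (st.1.insert price.1 price.2, st.2 ++ [price.1])) (d, f)).1.items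
      = d.items ++ aGo M f := by
  induction M generalizing d f with
  | nil => simp [aGo]
  | cons p M ih =>
    simp only [List.foldl_cons, aGo]
    by_cases hp : p.1 ∈ f
    · rw [if_pos hp, if_pos hp, ih d f hinv]
    · rw [if_neg hp, if_neg hp]
      have hc : d.contains p.1 = false := by
        cases hb : d.contains p.1
        · rfl
        · exact absurd (hinv _ hb) hp
      rw [ih (d.insert p.1 p.2) (f ++ [p.1]) ?_]
      · rw [PySem.Dict.items_insert_of_not_contains d p.2 hc, List.append_assoc]
        simp
      · intro t ht
        rw [PySem.Dict.contains_insert] at ht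
        simp only [Bool.or_eq_true, beq_iff_eq] at ht
        rcases ht with rfl | ht
        · simp
        · exact List.mem_append_left _ (hinv _ ht)

theorem aGo_congr (M : List (String × String)) (f f' : List String)
    (h : ∀ t, t ∈ f ↔ t ∈ f') : aGo M f = aGo M f' := by
  induction M generalizing f f' with
  | nil => rfl
  | cons p M ih =>
    simp only [aGo]
    by_cases hp : p.1 ∈ f
    · rw [if_pos hp, if_pos ((h _).mp hp), ih f f' h]
    · rw [if_neg hp, if_neg (fun hc => hp ((h _).mpr hc))]
      exact congrArg _ (ih _ _ (by intro t; simp [h t]))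

theorem aGo_found (M : List (String × String)) (f : List String) (t : String) :
    aGo M (f ++ [t]) = aGo (M.filter (fun p => decide (p.1 ≠ t))) f := by
  induction M generalizing f with
  | nil => rfl
  | cons p M ih =>
    simp only [List.filter_cons]
    by_cases hpt : p.1 = t
    · simp only [hpt, ne_eq, not_true_eq_false, decide_false, aGo]
      rw [if_pos (List.mem_append_right _ (by simp))]
      exact ih f
    · simp only [ne_eq, hpt, not_false_eq_true, decide_true, if_true, aGo]
      by_cases hpf : p.1 ∈ f
      · rw [if_pos (List.mem_append_left _ hpf), if_pos hpf]
        exact ih f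
      · rw [if_neg (by simp [hpf, hpt]), if_neg hpf]
        refine congrArg _ ?_
        rw [aGo_congr M ((f ++ [t]) ++ [p.1]) ((f ++ [p.1]) ++ [t]) (by intro u; simp; tauto)]
        exact ih (f ++ [p.1])

theorem max?_eq_some_of_unique {α κ : Type} [LinearOrder κ] (key : α → κ) (K : List α) (m : α)
    (hm : m ∈ K) (hmax : ∀ x ∈ K, x ≠ m → key x < key m) :
    PySem.List.max? K key = some m := by
  cases hK : PySem.List.max? K key with
  | none =>
    rw [PySem.List.max?_eq_none_iff] at hK
    subst hK; cases hm
  | some m' =>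
    by_cases he : m' = m
    · rw [he]
    · exact absurd (lt_of_le_of_lt (PySem.List.max?_isMax hK m hm)
        (hmax m' (PySem.List.max?_mem hK) he)) (lt_irrefl _)

theorem bGo_of_max (K : List (String × String)) (m : String × String)
    (h : PySem.List.max2? K Prod.fst Prod.snd = some m) :
    bGo K = (m.1, m.2) :: bGo (K.filter (fun k => decide (k.1 ≠ m.1))) := by
  rw [bGo]
  split
  · next heq => rw [h] at heq; cases heq
  · next m' heq => rw [h] at heq; cases heq; rfl

theorem bGo_nil : bGo [] = [] := by
  rw [bGo]
  rfl

theorem main_lemma (n : Nat) : ∀ (M K : List (String × String)), M.length ≤ n →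
    M.Pairwise (fun a b => toLex b < toLex a) → M.Perm K → aGo M [] = bGo K := by
  induction n with
  | zero =>
    intro M K hlen hpw hperm
    have hM : M = [] := List.length_eq_zero_iff.mp (Nat.le_zero.mp hlen)
    subst hM
    rw [List.Perm.eq_nil hperm.symm, bGo_nil]
    rfl
  | succ n ih =>
    intro M K hlen hpw hperm
    cases M with
    | nil =>
      rw [List.Perm.eq_nil hperm.symm, bGo_nil]
      rfl
    | cons m rest =>
      have hm : m ∈ K := hperm.subset (List.mem_cons_self ..)
      have hmax : PySem.List.max? K (fun p : String × String => toLex p) = some m := by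
        apply max?_eq_some_of_unique _ _ _ hm
        intro x hx hne
        rcases List.mem_cons.mp (hperm.mem_iff.mpr hx) with rfl | hx'
        · exact absurd rfl hne
        · exact (List.pairwise_cons.mp hpw).1 x hx'
      rw [bGo_of_max K m (by rw [max2?_eq_max?_lex]; exact hmax)]
      show (if m.1 ∈ ([] : List String) then _ else m :: aGo rest ([] ++ [m.1])) = _
      rw [if_neg (List.not_mem_nil)]
      refine congrArg₂ _ rfl ?_
      rw [aGo_found rest [] m.1]
      refine ih _ _ ?_ ((List.pairwise_cons.mp hpw).2.filter _) ?_
      · exact le_trans (List.length_filter_le _ _) (Nat.lt_succ_iff.mp hlen)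
      · have := hperm.filter (fun p : String × String => decide (p.1 ≠ m.1))
        simpa using this

theorem sorted2_eq_sorted_lex (xs : List (String × String)) :
    PySem.List.sorted2 xs Prod.fst Prod.snd = PySem.List.sorted xs (fun p => toLex p) := by
  rw [PySem.List.sorted_eq_foldl_insertBy]
  show List.foldl (fun acc x => PySem.List.insertBy
      (fun a b => decide (a.1 < b.1) || (!decide (b.1 < a.1) && decide (a.2 < b.2))) x acc) [] xs
    = List.foldl (fun acc x => PySem.List.insertBy
      (fun a b => decide (toLex a < toLex b)) x acc) [] xs
  congr 1
  funext acc x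
  congr 1
  funext a b
  exact Bool.eq_iff_iff.mpr (by rw [decide_eq_true_eq]; exact pyTupleLt_eq_lex a b)

theorem sorted2_rev_eq_sorted_lex (xs : List (String × String)) :
    PySem.List.sorted2 xs Prod.fst Prod.snd true = PySem.List.sorted xs (fun p => toLex p) true := by
  rw [PySem.List.sorted_rev_eq_foldl_insertBy]
  show List.foldl (fun acc x => PySem.List.insertBy
      (fun a b => decide (b.1 < a.1) || (!decide (a.1 < b.1) && decide (b.2 < a.2))) x acc) [] xs
    = List.foldl (fun acc x => PySem.List.insertBy
      (fun a b => decide (toLex b < toLex a)) x acc) [] xs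
  congr 1
  funext acc x
  congr 1
  funext a b
  exact Bool.eq_iff_iff.mpr (by rw [decide_eq_true_eq]; exact pyTupleLt_eq_lex b a)

-- x is the key with the latest date among the keys of K carrying x's ticker
def KeyTop (K : List (String × String)) (x : String × String) : Prop :=
  x ∈ K ∧ ∀ y ∈ K, y.1 = x.1 → toLex y ≤ toLex x

theorem exists_top (K : List (String × String)) (t : String) (h : ∃ y ∈ K, y.1 = t) :
    ∃ x ∈ K, x.1 = t ∧ ∀ y ∈ K, y.1 = t → toLex y ≤ toLex x := by
  obtain ⟨y0, hy0, hy0t⟩ := h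
  cases hmax : PySem.List.max? (K.filter (fun y => y.1 == t)) (fun p => toLex p) with
  | none =>
    rw [PySem.List.max?_eq_none_iff] at hmax
    have : y0 ∈ K.filter (fun y => y.1 == t) := List.mem_filter.mpr ⟨hy0, by simp [hy0t]⟩
    rw [hmax] at this
    cases this
  | some x =>
    have hx := List.mem_filter.mp (PySem.List.max?_mem hmax)
    exact ⟨x, hx.1, by simpa using hx.2,
      fun y hy hyt => PySem.List.max?_isMax hmax y (List.mem_filter.mpr ⟨hy, by simp [hyt]⟩)⟩

theorem bGo_subset (n : Nat) : ∀ K : List (String × String), K.length ≤ n →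
    ∀ x ∈ bGo K, x ∈ K := by
  induction n with
  | zero =>
    intro K hlen x hx
    have : K = [] := List.length_eq_zero_iff.mp (Nat.le_zero.mp hlen)
    subst this
    rw [bGo_nil] at hx
    cases hx
  | succ n ih =>
    intro K hlen x hx
    cases hmax : PySem.List.max2? K Prod.fst Prod.snd with
    | none =>
      rw [max2?_eq_max?_lex, PySem.List.max?_eq_none_iff] at hmax
      subst hmax
      rw [bGo_nil] at hx
      cases hx
    | some m =>
      have hm : m ∈ K := PySem.List.max?_mem (max2?_eq_max?_lex K ▸ hmax)
      rw [bGo_of_max K m hmax] at hx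
      rcases List.mem_cons.mp hx with rfl | hx'
      · exact hm
      · have hlt := filter_length_lt (fun k : String × String => decide (k.1 ≠ m.1)) K m hm (by simp)
        exact List.mem_of_mem_filter (ih _ (by omega) x hx')

theorem bGo_mem_iff (n : Nat) : ∀ K : List (String × String), K.length ≤ n →
    ∀ x, x ∈ bGo K ↔ KeyTop K x := by
  induction n with
  | zero =>
    intro K hlen x
    have : K = [] := List.length_eq_zero_iff.mp (Nat.le_zero.mp hlen)
    subst this
    rw [bGo_nil]
    simp [KeyTop]
  | succ n ih =>
    intro K hlen x
    cases hmax : PySem.List.max2? K Prod.fst Prod.snd with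
    | none =>
      rw [max2?_eq_max?_lex, PySem.List.max?_eq_none_iff] at hmax
      subst hmax
      rw [bGo_nil]
      simp [KeyTop]
    | some m =>
      have hm : m ∈ K := PySem.List.max?_mem (max2?_eq_max?_lex K ▸ hmax)
      have hisMax : ∀ y ∈ K, toLex y ≤ toLex m :=
        PySem.List.max?_isMax (max2?_eq_max?_lex K ▸ hmax)
      have hlt := filter_length_lt (fun k : String × String => decide (k.1 ≠ m.1)) K m hm (by simp)
      have ihK := ih (K.filter (fun k => decide (k.1 ≠ m.1))) (by omega)
      rw [bGo_of_max K m hmax, List.mem_cons]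
      constructor
      · rintro (rfl | hx')
        · exact ⟨hm, fun y hy _ => hisMax y hy⟩
        · obtain ⟨hxF, htop⟩ := (ihK x).mp hx'
          have hxne : x.1 ≠ m.1 := by simpa using (List.mem_filter.mp hxF).2
          refine ⟨List.mem_of_mem_filter hxF, fun y hy hyt => ?_⟩
          exact htop y (List.mem_filter.mpr ⟨hy, by simp [hyt, hxne]⟩) hyt
      · rintro ⟨hxK, htop⟩
        by_cases hx1 : x.1 = m.1
        · left
          have h1 : toLex x ≤ toLex m := hisMax x hxK
          have h2 : toLex m ≤ toLex x := htop m hm hx1.symm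
          exact toLex.injective (le_antisymm h1 h2) ▸ rfl
        · right
          refine (ihK x).mpr ⟨List.mem_filter.mpr ⟨hxK, by simp [hx1]⟩, ?_⟩
          intro y hy hyt
          exact htop y (List.mem_of_mem_filter hy) hyt

theorem bGo_pairwise (n : Nat) : ∀ K : List (String × String), K.length ≤ n →
    (bGo K).Pairwise (fun a b => toLex b < toLex a) := by
  induction n with
  | zero =>
    intro K hlen
    have : K = [] := List.length_eq_zero_iff.mp (Nat.le_zero.mp hlen)
    subst this
    rw [bGo_nil]
    exact List.Pairwise.nil
  | succ n ih =>
    intro K hlen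
    cases hmax : PySem.List.max2? K Prod.fst Prod.snd with
    | none =>
      rw [max2?_eq_max?_lex, PySem.List.max?_eq_none_iff] at hmax
      subst hmax
      rw [bGo_nil]
      exact List.Pairwise.nil
    | some m =>
      have hm : m ∈ K := PySem.List.max?_mem (max2?_eq_max?_lex K ▸ hmax)
      have hisMax : ∀ y ∈ K, toLex y ≤ toLex m :=
        PySem.List.max?_isMax (max2?_eq_max?_lex K ▸ hmax)
      have hlt := filter_length_lt (fun k : String × String => decide (k.1 ≠ m.1)) K m hm (by simp)
      rw [bGo_of_max K m hmax]
      refine List.pairwise_cons.mpr ⟨?_, ih _ (by omega)⟩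
      intro x hx
      have hxF := bGo_subset _ _ le_rfl x hx
      have hxne : x.1 ≠ m.1 := by simpa using (List.mem_filter.mp hxF).2
      refine lt_of_le_of_ne (hisMax x (List.mem_of_mem_filter hxF)) ?_
      intro he
      exact hxne (congrArg (fun p : String × String => p.1) (toLex.injective he))

theorem fold_inv (K : List (String × String)) :
    (K.foldl bStep PySem.Dict.empty).keys.Nodup ∧
    (∀ x, x ∈ (K.foldl bStep PySem.Dict.empty).items ↔ KeyTop K x) := by
  induction K using List.reverseRecOn with
  | nil =>
    constructor
    · exact List.Pairwise.nil
    · intro x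
      simp [PySem.Dict.empty, KeyTop]
  | append_singleton K k ih =>
    obtain ⟨hnd, hit⟩ := ih
    rw [List.foldl_append]
    set D := K.foldl bStep PySem.Dict.empty with hD
    have hkeys : D.keys = D.items.map (fun p => p.1) := rfl
    have hcont : ∀ t, D.contains t = true ↔ ∃ y ∈ K, y.1 = t := by
      intro t
      rw [PySem.Dict.contains_iff_mem_keys, hkeys, List.mem_map]
      constructor
      · rintro ⟨p, hp, rfl⟩
        exact ⟨p, ((hit p).mp hp).1, rfl⟩
      · rintro ⟨y, hy, rfl⟩
        obtain ⟨x, hxK, hxt, hmax⟩ := exists_top K y.1 ⟨y, hy, rfl⟩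
        exact ⟨x, (hit x).mpr ⟨hxK, fun z hz hzt => hmax z hz (hxt ▸ hzt)⟩, hxt⟩
    show (bStep D k).keys.Nodup ∧ ∀ x, x ∈ (bStep D k).items ↔ KeyTop (K ++ [k]) x
    unfold bStep
    by_cases hc : D.contains k.1 = false
    · rw [if_pos hc]
      have hnotin : ¬ ∃ y ∈ K, y.1 = k.1 := by
        rw [← hcont]
        simp [hc]
      have hitems := PySem.Dict.items_insert_of_not_contains D k.2 hc
      constructor
      · show ((D.insert k.1 k.2).items.map (fun p => p.1)).Nodup
        rw [hitems, List.map_append]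
        have hknot : k.1 ∉ D.keys := fun hmem => by
          rw [(PySem.Dict.contains_iff_mem_keys D k.1).mpr hmem] at hc
          cases hc
        refine List.Nodup.append (hkeys ▸ hnd) (List.nodup_singleton _) ?_
        intro t ht ht'
        simp only [List.map_cons, List.map_nil, List.mem_singleton] at ht'
        subst ht'
        exact hknot (hkeys ▸ ht)
      · intro x
        rw [hitems, List.mem_append]
        constructor
        · rintro (hx | hx)
          · obtain ⟨hxK, htop⟩ := (hit x).mp hx
            have hxne : x.1 ≠ k.1 := fun he => hnotin ⟨x, hxK, he⟩
            refine ⟨List.mem_append_left _ hxK, fun y hy hyt => ?_⟩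
            rcases List.mem_append.mp hy with hy' | hy'
            · exact htop y hy' hyt
            · rw [List.mem_singleton.mp hy'] at hyt
              exact absurd hyt.symm hxne
          · rw [List.mem_singleton.mp hx]
            refine ⟨List.mem_append_right _ (by simp), fun y hy hyt => ?_⟩
            rcases List.mem_append.mp hy with hy' | hy'
            · exact absurd ⟨y, hy', hyt⟩ hnotin
            · rw [List.mem_singleton.mp hy']
        · rintro ⟨hxK, htop⟩
          rcases List.mem_append.mp hxK with hx' | hx'
          · left
            refine (hit x).mpr ⟨hx', fun y hy hyt => htop y (List.mem_append_left _ hy) hyt⟩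
          · right
            simpa using hx'
    · have hc' : D.contains k.1 = true := by simpa using hc
      rw [if_neg hc]
      cases hget : D.get? k.1 with
      | none => exact absurd ((PySem.Dict.get?_eq_none_iff_contains D k.1).mp hget) (by simp [hc'])
      | some v =>
        have hgetD : D.getD k.1 "" = v := by simp [PySem.Dict.getD, hget]
        have hvK : (k.1, v) ∈ D.items :=
          (PySem.Dict.get?_eq_some_iff_mem_items D k.1 v hnd).mp hget
        obtain ⟨hvMem, hvTop⟩ := (hit (k.1, v)).mp hvK
        by_cases hlt : D.getD k.1 "" < k.2
        · rw [if_pos hlt]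
          rw [hgetD] at hlt
          have hitems := PySem.Dict.items_insert_of_contains D k.2 hc'
          have hkeq : (D.insert k.1 k.2).keys = D.keys := by
            show ((D.insert k.1 k.2).items.map (fun p => p.1)) = _
            rw [hitems, List.map_map, hkeys]
            refine List.map_congr_left ?_
            intro p _
            by_cases h : p.1 = k.1 <;> simp [h]
          have hmem : ∀ x, x ∈ (D.insert k.1 k.2).items ↔ (x = k ∨ (x ∈ D.items ∧ x.1 ≠ k.1)) := by
            intro x
            rw [hitems, List.mem_map]
            constructor
            · rintro ⟨p, hp, rfl⟩
              by_cases h : p.1 = k.1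
              · simp [h]
              · right
                simp only [h, beq_iff_eq]
                exact ⟨hp, h⟩
            · rintro (rfl | ⟨hx, hxne⟩)
              · exact ⟨(x.1, v), hvK, by simp⟩
              · exact ⟨x, hx, by simp [hxne]⟩
          constructor
          · rw [hkeq]; exact hnd
          · intro x
            rw [hmem x]
            constructor
            · rintro (rfl | ⟨hx, hxne⟩)
              · refine ⟨List.mem_append_right _ (by simp), fun y hy hyt => ?_⟩
                rcases List.mem_append.mp hy with hy' | hy'
                · calc toLex y ≤ toLex (x.1, v) := hvTop y hy' hyt
                    _ ≤ toLex x := le_of_lt (by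
                      rw [Prod.Lex.toLex_lt_toLex]
                      exact Or.inr ⟨rfl, hlt⟩)
                · rw [List.mem_singleton.mp hy']
              · obtain ⟨hxK, htop⟩ := (hit x).mp hx
                refine ⟨List.mem_append_left _ hxK, fun y hy hyt => ?_⟩
                rcases List.mem_append.mp hy with hy' | hy'
                · exact htop y hy' hyt
                · rw [List.mem_singleton.mp hy'] at hyt
                  exact absurd hyt.symm hxne
            · rintro ⟨hxK, htop⟩
              by_cases hx1 : x.1 = k.1
              · left
                have h1 : toLex k ≤ toLex x := htop k (List.mem_append_right _ (by simp)) hx1.symm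
                have h2 : toLex x ≤ toLex k := by
                  rcases List.mem_append.mp hxK with hx' | hx'
                  · calc toLex x ≤ toLex (k.1, v) := hvTop x hx' hx1
                      _ ≤ toLex k := le_of_lt (by
                        rw [Prod.Lex.toLex_lt_toLex]
                        exact Or.inr ⟨rfl, hlt⟩)
                  · rw [List.mem_singleton.mp hx']
                exact (toLex.injective (le_antisymm h1 h2)).symm ▸ rfl
              · right
                have hxK' : x ∈ K := by
                  rcases List.mem_append.mp hxK with hx' | hx'
                  · exact hx'
                  · exact absurd (congrArg (fun p : String × String => p.1)
                      (List.mem_singleton.mp hx')) hx1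
                exact ⟨(hit x).mpr ⟨hxK', fun y hy hyt =>
                  htop y (List.mem_append_left _ hy) hyt⟩, hx1⟩
        · rw [if_neg hlt]
          rw [hgetD] at hlt
          have hk2v : k.2 ≤ v := not_lt.mp hlt
          constructor
          · exact hnd
          · intro x
            constructor
            · intro hx
              obtain ⟨hxK, htop⟩ := (hit x).mp hx
              refine ⟨List.mem_append_left _ hxK, fun y hy hyt => ?_⟩
              rcases List.mem_append.mp hy with hy' | hy'
              · exact htop y hy' hyt
              · rw [List.mem_singleton.mp hy'] at hyt ⊢
                calc toLex k ≤ toLex (k.1, v) := by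
                      rw [Prod.Lex.toLex_le_toLex]
                      exact Or.inr ⟨rfl, hk2v⟩
                  _ = toLex x := by
                      have hx2 : D.get? x.1 = some x.2 := PySem.Dict.get?_of_mem_items D (k := x.1) (v := x.2) hx hnd
                      rw [← hyt, hget] at hx2
                      have hv2 : v = x.2 := by injection hx2
                      exact congrArg (fun p : String × String => toLex p)
                        (Prod.ext_iff.mpr ⟨hyt, hv2⟩)
            · rintro ⟨hxK, htop⟩
              rcases List.mem_append.mp hxK with hx' | hx'
              · exact (hit x).mpr ⟨hx', fun y hy hyt => htop y (List.mem_append_left _ hy) hyt⟩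
              · rw [List.mem_singleton.mp hx'] at htop ⊢
                have h1 : toLex (k.1, v) ≤ toLex k := htop (k.1, v) (List.mem_append_left _ hvMem) rfl
                have h2 : toLex k ≤ toLex (k.1, v) := by
                  rw [Prod.Lex.toLex_le_toLex]
                  exact Or.inr ⟨rfl, hk2v⟩
                have : (k.1, v) = k := toLex.injective (le_antisymm h1 h2)
                rw [← this]
                exact hvK

theorem alt_eq_bGo (keys : List (String × String)) :
    PySem.List.sorted2 (keys.foldl bStep PySem.Dict.empty).items Prod.fst Prod.snd true
      = bGo keys := by
  rw [sorted2_rev_eq_sorted_lex]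
  obtain ⟨hnd, hit⟩ := fold_inv keys
  apply PySem.List.sorted_rev_eq_of_perm_of_pairwise_gt
  · rw [List.perm_ext_iff_of_nodup ?_ (hnd.of_map _)]
    · intro x
      rw [bGo_mem_iff keys.length keys le_rfl x, hit x]
    · refine (bGo_pairwise keys.length keys le_rfl).imp ?_
      intro a b h he
      rw [he] at h
      exact lt_irrefl _ h
  · exact bGo_pairwise keys.length keys le_rfl

-- ===== VERDICT (by name: the statement is the Claim_ definition above) =====
theorem lastDates_spec : Claim_equal_lastDates := by
  intro prices tickerList _
  show lastDates prices tickerList = lastDates_alt prices tickerList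
  unfold lastDates lastDates_alt
  set keys : List (String × String) := PySem.Set.ofList (prices.map (fun p => (p.1, p.2.1))) with hkeys
  rw [scan_items _ _ _ (by intro t h; rw [PySem.Dict.contains_empty] at h; exact absurd h (by simp))]
  rw [sorted2_eq_sorted_lex]
  set L := PySem.List.sorted keys (fun p => toLex p) with hL
  have hperm : L.Perm keys := PySem.List.sorted_perm keys _ false
  have hnodup : L.Nodup := hperm.nodup_iff.mpr (PySem.Set.nodup_ofList _)
  have hpw : L.Pairwise (fun a b => toLex a < toLex b) := by
    have h1 := PySem.List.sorted_pairwise keys (fun p : String × String => toLex p)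
    have h2 : L.Pairwise (fun a b => a ≠ b) := hnodup
    exact ((h1.and h2).imp (fun {a b} hab =>
      lt_of_le_of_ne hab.1 (fun he => hab.2 (toLex.injective he))))
  have hemp : PySem.Dict.empty.items ++ aGo L.reverse [] = aGo L.reverse [] := by
    simp [PySem.Dict.empty]
  rw [hemp]
  rw [alt_eq_bGo keys]
  exact main_lemma L.reverse.length L.reverse keys le_rfl
    (List.pairwise_reverse.mpr hpw) (L.reverse_perm.trans hperm)
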